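-- pv_equiv track=rewrite | github.com/AlGotIt/Algorithm2023 | Dain/230524_Baekjoon_스위치_키고_끄기.py | girl_control
-- ===== SOURCE A (Python) =====
-- def girl_control(switch, num):
--     pos = 0
--     while num - pos > 0 and num + pos < len(switch):
--         if pos == 0:
--             switch[num] = 1 if switch[num] == 0 else 0
--         elif switch[num - pos] == switch[num + pos]:
--             switch[num - pos] = 1 if switch[num - pos] == 0 else 0
--             switch[num + pos] = 1 if switch[num + pos] == 0 else 0
--         else:
--             break
--         pos += 1
--     return switch
-- ===== SOURCE B (Python) =====
-- def girl_control(switch, num):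
--     # Two-phase version: first find the toggle radius k by reading the
--     # original values, then apply all flips. Mutates switch in place like A.
--     n = len(switch)
--     if not (0 < num < n):
--         return switch
--     k = 0
--     while num - (k + 1) > 0 and num + (k + 1) < n and switch[num - (k + 1)] == switch[num + (k + 1)]:
--         k += 1
--     switch[num] = 1 if switch[num] == 0 else 0
--     for p in range(1, k + 1):
--         switch[num - p] = 1 if switch[num - p] == 0 else 0
--         switch[num + p] = 1 if switch[num + p] == 0 else 0
--     return switch
-- ===== Notes on version B (the rewrite author's own statement) =====
-- stated objective: alternative
-- what changed: A's single interleaved check-and-toggle while loop is split into a read-only scan that finds the toggle radius k from the original values, followed by a separate apply pass that flips the centre and the k symmetric pairs.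
import Mathlib
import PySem

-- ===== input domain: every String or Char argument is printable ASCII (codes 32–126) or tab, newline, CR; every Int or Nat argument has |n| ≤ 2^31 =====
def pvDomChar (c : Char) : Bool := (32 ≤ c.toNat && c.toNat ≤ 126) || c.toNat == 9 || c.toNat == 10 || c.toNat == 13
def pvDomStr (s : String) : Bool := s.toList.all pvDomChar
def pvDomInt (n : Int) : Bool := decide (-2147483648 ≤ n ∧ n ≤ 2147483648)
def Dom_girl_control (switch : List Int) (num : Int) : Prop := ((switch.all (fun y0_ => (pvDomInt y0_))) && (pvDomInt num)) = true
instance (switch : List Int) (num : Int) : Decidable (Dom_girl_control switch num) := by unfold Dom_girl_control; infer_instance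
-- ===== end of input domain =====

-- B replaces A's interleaved check-and-toggle while loop by a read-only pass that finds the
-- toggle radius first and a separate pass that applies the flips (objective: alternative
-- decomposition, same cost). Both Pythons mutate `switch` in place; the equivalence proved
-- here is about the RETURN value only.

-- ===== PORT A =====
-- All indexing in A happens under the loop guard (0 < num - pos, num + pos < len), so every
-- subscript is in range; pyGetD/pySetD are exact there (no IndexError is reachable).
def pvFlipA (x : Int) : Int := if x = 0 then 1 else 0

def girlLoopA (switch : List Int) (num : Int) (pos : Int) : Nat → List Int
  | 0 => switch
  | fuel + 1 =>
    if num - pos > 0 ∧ num + pos < (switch.length : Int) then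
      if pos = 0 then
        girlLoopA (PySem.List.pySetD switch num (pvFlipA (PySem.List.pyGetD switch num 0)))
          num (pos + 1) fuel
      else if PySem.List.pyGetD switch (num - pos) 0 = PySem.List.pyGetD switch (num + pos) 0 then
        girlLoopA
          (let s1 := PySem.List.pySetD switch (num - pos)
              (pvFlipA (PySem.List.pyGetD switch (num - pos) 0))
           PySem.List.pySetD s1 (num + pos) (pvFlipA (PySem.List.pyGetD s1 (num + pos) 0)))
          num (pos + 1) fuel
      else switch
    else switch

-- the while loop runs at most num.toNat + 1 guard checks (pos < num is required to continue)
def girl_control (switch : List Int) (num : Int) : List Int :=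
  girlLoopA switch num 0 (num.toNat + 1)

-- ===== PORT B =====
def pvFlipB (x : Int) : Int := if x = 0 then 1 else 0

-- first phase: read-only scan for the radius k (at most num.toNat iterations)
def girlFindK (switch : List Int) (num : Int) (k : Int) : Nat → Int
  | 0 => k
  | fuel + 1 =>
    if num - (k + 1) > 0 ∧ num + (k + 1) < (switch.length : Int) ∧
       PySem.List.pyGetD switch (num - (k + 1)) 0 = PySem.List.pyGetD switch (num + (k + 1)) 0 then
      girlFindK switch num (k + 1) fuel
    else k

-- second phase: one step of the apply loop (flip the symmetric pair at radius p)
def girlApply (num : Int) (s : List Int) (p : Int) : List Int :=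
  let s1 := PySem.List.pySetD s (num - p) (pvFlipB (PySem.List.pyGetD s (num - p) 0))
  PySem.List.pySetD s1 (num + p) (pvFlipB (PySem.List.pyGetD s1 (num + p) 0))

def girl_control_alt (switch : List Int) (num : Int) : List Int :=
  if 0 < num ∧ num < (switch.length : Int) then
    let k := girlFindK switch num 0 num.toNat
    let s1 := PySem.List.pySetD switch num (pvFlipB (PySem.List.pyGetD switch num 0))
    (PySem.List.pyRange 1 (k + 1) 1).foldl (girlApply num) s1
  else switch

-- ===== PRECONDITION & SPEC =====
def Spec_girl_control (switch : List Int) (num : Int) (out : List Int) : Prop := out = girl_control_alt switch num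
instance (switch : List Int) (num : Int) (out : List Int) : Decidable (Spec_girl_control switch num out) := by unfold Spec_girl_control; infer_instance

-- ===== CLAIM (what is proved, stated in full; the proofs are below) =====
def Claim_equal_girl_control : Prop := ∀ (switch : List Int) (num : Int), Dom_girl_control switch num → Spec_girl_control switch num (girl_control switch num)

-- ===== LEMMAS AND PROOFS =====

-- the state after flipping the centre and radii 1..k (B's apply phase, as an expression)
def girlG (s0 : List Int) (num : Int) (k : Int) : List Int :=
  (PySem.List.pyRange 1 (k + 1) 1).foldl (girlApply num)
    (PySem.List.pySetD s0 num (pvFlipB (PySem.List.pyGetD s0 num 0)))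

theorem pyGetD_pySetD_ne (s : List Int) (iw i v : Int) (hw : 0 ≤ iw) (hi : 0 ≤ i)
    (hne : iw ≠ i) :
    PySem.List.pyGetD (PySem.List.pySetD s iw v) i 0 = PySem.List.pyGetD s i 0 := by
  rw [PySem.List.pySetD_of_nonneg _ _ hw,
      PySem.List.pyGetD_of_nonneg _ _ hi, PySem.List.pyGetD_of_nonneg _ _ hi,
      List.getD_eq_getElem?_getD, List.getD_eq_getElem?_getD,
      List.getElem?_set_ne (by omega)]

theorem length_girlApply (num : Int) (s : List Int) (p : Int) :
    (girlApply num s p).length = s.length := by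
  simp [girlApply, PySem.List.length_pySetD]

theorem length_foldl_girlApply (num : Int) (l : List Int) (s : List Int) :
    (l.foldl (girlApply num) s).length = s.length := by
  induction l generalizing s with
  | nil => rfl
  | cons a l ih => simp [List.foldl_cons, ih, length_girlApply]

theorem length_girlG (s0 : List Int) (num : Int) (k : Int) :
    (girlG s0 num k).length = s0.length := by
  simp [girlG, length_foldl_girlApply, PySem.List.length_pySetD]

theorem girlG_zero (s0 : List Int) (num : Int) :
    girlG s0 num 0 = PySem.List.pySetD s0 num (pvFlipB (PySem.List.pyGetD s0 num 0)) := by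
  simp [girlG, PySem.List.pyRange_one_eq_nil]

theorem girlG_succ (s0 : List Int) (num : Int) (k : Int) (hk : 0 ≤ k) :
    girlG s0 num (k + 1) = girlApply num (girlG s0 num k) (k + 1) := by
  unfold girlG
  rw [show k + 1 + 1 = (k + 1) + 1 from rfl,
      PySem.List.pyRange_one_succ_right (by omega), List.foldl_append]
  rfl

-- the apply phase only writes inside the band [num-k, num+k]; outside it reads like s0
theorem girlG_agree (s0 : List Int) (num : Int) (k : Int) (hk : 0 ≤ k)
    (hband : 0 < num - k) (i : Int) (hi : 0 ≤ i) (hout : i < num - k ∨ num + k < i) :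
    PySem.List.pyGetD (girlG s0 num k) i 0 = PySem.List.pyGetD s0 i 0 := by
  induction k, hk using Int.le_induction generalizing i with
  | base =>
    rw [girlG_zero]
    exact pyGetD_pySetD_ne _ _ _ _ (by omega) hi (by omega)
  | succ k hk ih =>
    rw [girlG_succ _ _ _ hk]
    unfold girlApply
    rw [pyGetD_pySetD_ne _ _ _ _ (by omega) hi (by omega),
        pyGetD_pySetD_ne _ _ _ _ (by omega) hi (by omega)]
    exact ih (by omega) i hi (by omega)

-- main bridge: A's interleaved loop from radius k+1, started on the band state girlG k,
-- produces exactly the band state for the radius B's scan finds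
theorem loopA_eq_findK (s0 : List Int) (num : Int)
    (fuel : Nat) (k : Int) (hk : 0 ≤ k) (hband : 0 < num - k) :
    girlLoopA (girlG s0 num k) num (k + 1) fuel = girlG s0 num (girlFindK s0 num k fuel) := by
  induction fuel generalizing k with
  | zero => rfl
  | succ fuel ih =>
    rw [girlLoopA, girlFindK]
    have hlen : ((girlG s0 num k).length : Int) = (s0.length : Int) := by
      rw [length_girlG]
    by_cases hb : num - (k + 1) > 0 ∧ num + (k + 1) < (s0.length : Int)
    · have hg1 : PySem.List.pyGetD (girlG s0 num k) (num - (k + 1)) 0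
          = PySem.List.pyGetD s0 (num - (k + 1)) 0 :=
        girlG_agree s0 num k hk hband _ (by omega) (by omega)
      have hg2 : PySem.List.pyGetD (girlG s0 num k) (num + (k + 1)) 0
          = PySem.List.pyGetD s0 (num + (k + 1)) 0 :=
        girlG_agree s0 num k hk hband _ (by omega) (by omega)
      rw [if_pos (show num - (k+1) > 0 ∧ num + (k+1) < ((girlG s0 num k).length : Int) from ⟨by omega, by rw [hlen]; omega⟩),
          if_neg (show ¬ (k + 1 = 0) by omega)]
      by_cases he : PySem.List.pyGetD s0 (num - (k + 1)) 0 = PySem.List.pyGetD s0 (num + (k + 1)) 0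
      · rw [if_pos (by rw [hg1, hg2]; exact he), if_pos ⟨hb.1, hb.2, he⟩]
        have hstep :
            (let s1 := PySem.List.pySetD (girlG s0 num k) (num - (k + 1))
                (pvFlipA (PySem.List.pyGetD (girlG s0 num k) (num - (k + 1)) 0))
             PySem.List.pySetD s1 (num + (k + 1))
                (pvFlipA (PySem.List.pyGetD s1 (num + (k + 1)) 0)))
            = girlG s0 num (k + 1) := by
          rw [girlG_succ _ _ _ hk]; rfl
        rw [hstep]
        exact ih (k + 1) (by omega) (by omega)
      · rw [if_neg (by rw [hg1, hg2]; exact he),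
            if_neg (by intro h; exact he h.2.2)]
    · rw [if_neg (by rw [hlen]; omega), if_neg (by omega)]

-- ===== VERDICT (by name: the statement is the Claim_ definition above) =====
theorem girl_control_spec : Claim_equal_girl_control := by
  intro switch num _
  unfold Spec_girl_control girl_control girl_control_alt
  rw [girlLoopA]
  by_cases h : 0 < num ∧ num < (switch.length : Int)
  · rw [if_pos (by omega), if_pos rfl, if_pos h]
    have h0 : PySem.List.pySetD switch num (pvFlipA (PySem.List.pyGetD switch num 0))
        = girlG switch num 0 := by rw [girlG_zero]; rfl
    rw [h0, show (0 : Int) + 1 = 0 + 1 from rfl]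
    have := loopA_eq_findK switch num num.toNat 0 (by omega) (by omega)
    rw [this]
    rfl
  · rw [if_neg (by omega), if_neg h]
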